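-- pv_equiv track=rewrite | github.com/ArthurBoaro/my-daily-coding-challenge-fcc | April 16, 2026.py | do_math
-- ===== SOURCE A (Python) =====
-- def do_math(s):
--
--     last_number = None
--     number = ""
--     char_count = 0
--     result = 0
--     start = False
--
--     for char in s:
--         if char.isdigit():
--             number += char
--             start = True
--         else:
--             if number != "":
--                 num = int(number)
--                 if last_number == None:
--                     result = num
--                 else:
--                     if char_count % 2 == 0:
--                         result += num
--                     else:
--                         result -= num
--
--                 last_number = num;
--                 number = ""
--                 char_count = 0
--
--             if start:
--                 char_count += 1
--
--     if number != "":
--         num = int(number)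
--         if last_number == None:
--             result = num
--         else:
--             if char_count % 2 == 0:
--                     result += num
--             else:
--                 result -= num
--
--     return result
-- ===== SOURCE B (Python) =====
-- def do_math(s):
--     # Tokenize into maximal same-kind runs, then fold over the runs.
--     runs = []
--     i, n = 0, len(s)
--     while i < n:
--         d = s[i].isdigit()
--         j = i + 1
--         while j < n and s[j].isdigit() == d:
--             j += 1
--         runs.append((d, s[i:j]))
--         i = j
--     result = None
--     gap = 0
--     for d, text in runs:
--         if d:
--             if result is None:
--                 result = int(text)
--             elif gap % 2 == 0:
--                 result += int(text)
--             else: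
--                 result -= int(text)
--         elif result is not None:
--             gap = len(text)
--     return result if result is not None else 0
-- ===== Notes on version B (the rewrite author's own statement) =====
-- stated objective: alternative
-- what changed: B tokenizes the string into a list of maximal same-kind (digit/non-digit) runs in one pass and then folds the add/subtract logic over the run list, using the non-digit run's length as the separator-parity gap, instead of A's character-by-character loop with a pending number buffer, running char_count and start flag.
import Mathlib
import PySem

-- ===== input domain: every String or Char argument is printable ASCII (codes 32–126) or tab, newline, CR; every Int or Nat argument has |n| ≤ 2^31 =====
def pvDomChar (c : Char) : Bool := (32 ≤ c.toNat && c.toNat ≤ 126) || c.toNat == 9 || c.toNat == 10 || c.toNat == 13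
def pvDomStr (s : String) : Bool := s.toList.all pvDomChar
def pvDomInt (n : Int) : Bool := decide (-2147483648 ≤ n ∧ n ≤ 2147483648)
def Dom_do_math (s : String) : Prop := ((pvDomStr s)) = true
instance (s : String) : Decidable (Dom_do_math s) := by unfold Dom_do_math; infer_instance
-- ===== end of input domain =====

-- B tokenizes the string into maximal same-kind runs and folds over the run list,
-- replacing A's character-by-character accumulator machine; objective: alternative (same cost).

-- ===== PORT A =====
-- int(number) — both Pythons call int() on a nonempty all-digit substring, where ofChars? is exact
def pyInt (cs : List Char) : Int := (PySem.Int.ofChars? cs).getD 0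

-- one iteration of A's `for char in s` loop; state = (last_number, number, char_count, result, start)
def stepA (st : Option Int × List Char × Int × Int × Bool) (c : Char) :
    Option Int × List Char × Int × Int × Bool :=
  let (last, number, cc, result, start) := st
  if PySem.Chars.isdigit c then
    (last, number ++ [c], cc, result, true)
  else
    let (last, number, cc, result) :=
      if number ≠ [] then
        let num := pyInt number
        let result :=
          match last with
          | none => num
          | some _ => if PySem.Int.mod cc 2 == 0 then result + num else result - num
        (some num, ([] : List Char), (0 : Int), result)
      else (last, number, cc, result)
    let cc := if start then cc + 1 else cc
    (last, number, cc, result, start)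

-- A's trailing `if number != ""` flush after the loop
def finishA (st : Option Int × List Char × Int × Int × Bool) : Int :=
  let (last, number, cc, result, _) := st
  if number ≠ [] then
    let num := pyInt number
    match last with
    | none => num
    | some _ => if PySem.Int.mod cc 2 == 0 then result + num else result - num
  else result

def do_math (s : String) : Int :=
  finishA (s.toList.foldl stepA (none, [], 0, 0, false))

-- ===== PORT B =====
-- B's tokenizer: maximal runs of chars of equal digit-ness (the two nested while loops)
def runsB : List Char → List (Bool × List Char)
  | [] => []
  | c :: rest =>
    let d := PySem.Chars.isdigit c
    (d, c :: rest.takeWhile (fun x => PySem.Chars.isdigit x == d)) ::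
      runsB (rest.dropWhile (fun x => PySem.Chars.isdigit x == d))
termination_by l => l.length
decreasing_by exact Nat.lt_succ_of_le (List.length_dropWhile_le _ rest)

-- one iteration of B's `for d, text in runs` loop; state = (result : Option, gap)
def stepB (st : Option Int × Int) (r : Bool × List Char) : Option Int × Int :=
  let (res, gap) := st
  if r.1 then
    match res with
    | none => (some (pyInt r.2), gap)
    | some v =>
      if PySem.Int.mod gap 2 == 0 then (some (v + pyInt r.2), gap)
      else (some (v - pyInt r.2), gap)
  else
    match res with
    | some _ => (res, (r.2.length : Int))
    | none => (res, gap)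

def do_math_alt (s : String) : Int :=
  (((runsB s.toList).foldl stepB (none, 0)).1).getD 0

-- ===== PRECONDITION & SPEC =====
def Spec_do_math (s : String) (out : Int) : Prop := out = do_math_alt s
instance (s : String) (out : Int) : Decidable (Spec_do_math s out) := by unfold Spec_do_math; infer_instance

-- ===== CLAIM (what is proved, stated in full; the proofs are below) =====
def Claim_equal_do_math : Prop := ∀ (s : String), Dom_do_math s → Spec_do_math s (do_math s)

-- ===== LEMMAS AND PROOFS =====

-- simulation relation between A's loop state and B's loop state at a run boundary
def RelAB (last : Option Int) (number : List Char) (cc result : Int) (start : Bool)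
    (res : Option Int) (gap : Int) : Prop :=
  (start = false ∧ last = none ∧ number = [] ∧ cc = 0 ∧ result = 0 ∧ res = none)
  ∨ (start = true ∧ number = [] ∧ last.isSome = true ∧ res = some result ∧ gap = cc)
  ∨ (start = true ∧ number ≠ [] ∧ last = none ∧ cc = 0 ∧ result = 0 ∧ res = some (pyInt number))
  ∨ (start = true ∧ number ≠ [] ∧ last.isSome = true ∧
      res = some (if PySem.Int.mod cc 2 == 0 then result + pyInt number
                  else result - pyInt number))

-- boundary condition: the head of the remaining input starts a fresh maximal run
def BndAB (number : List Char) (start : Bool) : List Char → Prop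
  | [] => True
  | c :: _ => (number ≠ [] → PySem.Chars.isdigit c = false)
      ∧ (start = true → number = [] → PySem.Chars.isdigit c = true)

-- A's fold over an all-digit block just appends it to `number`
lemma foldA_digits (r : List Char) (h : ∀ c ∈ r, PySem.Chars.isdigit c = true)
    (last : Option Int) (number : List Char) (cc result : Int) (start : Bool) :
    r.foldl stepA (last, number, cc, result, start)
      = (last, number ++ r, cc, result, if r.isEmpty then start else true) := by
  induction r generalizing number start with
  | nil => simp
  | cons c r' ih =>
    have hc : PySem.Chars.isdigit c = true := h c (by simp)
    simp only [List.foldl_cons, stepA, hc, if_pos trivial]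
    rw [ih (fun x hx => h x (by simp [hx]))]
    cases r' <;> simp

-- A's fold over an all-non-digit block with no pending number only bumps char_count
lemma foldA_nondigits (r : List Char) (h : ∀ c ∈ r, PySem.Chars.isdigit c = false)
    (last : Option Int) (cc result : Int) (start : Bool) :
    r.foldl stepA (last, [], cc, result, start)
      = (last, [], cc + (if start then (r.length : Int) else 0), result, start) := by
  induction r generalizing cc with
  | nil => simp
  | cons c r' ih =>
    have hc : PySem.Chars.isdigit c = false := h c (by simp)
    have hstep : stepA (last, [], cc, result, start) c
        = (last, [], (if start then cc + 1 else cc), result, start) := by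
      simp [stepA, hc]
    rw [List.foldl_cons, hstep, ih (fun x hx => h x (by simp [hx]))]
    cases start
    · simp
    · simp [List.length_cons]; ring

-- the main simulation: from related states at a run boundary, both programs finish equal
lemma main_sim : ∀ (n : Nat) (l : List Char), l.length ≤ n →
    ∀ (last : Option Int) (number : List Char) (cc result : Int) (start : Bool)
      (res : Option Int) (gap : Int),
      RelAB last number cc result start res gap → BndAB number start l →
      finishA (l.foldl stepA (last, number, cc, result, start))
        = ((runsB l).foldl stepB (res, gap)).1.getD 0 := by
  intro n
  induction n with
  | zero =>
    intro l hl last number cc result start res gap hR _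
    have : l = [] := List.eq_nil_of_length_eq_zero (Nat.le_zero.mp hl)
    subst this
    simp only [List.foldl_nil, runsB]
    rcases hR with ⟨hs, hl0, hn, hc, hr, hres⟩ | ⟨hs, hn, _, hres, _⟩ |
      ⟨hs, hn, hl0, hc, hr, hres⟩ | ⟨hs, hn, hl0, hres⟩
    · subst hl0 hn hc hr hres; simp [finishA]
    · subst hn hres; simp [finishA]
    · subst hl0 hc hr hres; simp [finishA, hn]
    · rw [hres]; obtain ⟨v, hv⟩ := Option.isSome_iff_exists.mp hl0
      subst hv; simp [finishA, hn]
  | succ n ih =>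
    intro l hl last number cc result start res gap hR hB
    cases l with
    | nil =>
      simp only [List.foldl_nil, runsB]
      rcases hR with ⟨hs, hl0, hn, hc, hr, hres⟩ | ⟨hs, hn, _, hres, _⟩ |
        ⟨hs, hn, hl0, hc, hr, hres⟩ | ⟨hs, hn, hl0, hres⟩
      · subst hl0 hn hc hr hres; simp [finishA]
      · subst hn hres; simp [finishA]
      · subst hl0 hc hr hres; simp [finishA, hn]
      · rw [hres]; obtain ⟨v, hv⟩ := Option.isSome_iff_exists.mp hl0
        subst hv; simp [finishA, hn]
    | cons c rest =>
      obtain ⟨d, hd⟩ : ∃ d, PySem.Chars.isdigit c = d := ⟨_, rfl⟩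
      obtain ⟨p, hp⟩ : ∃ p, p = (fun x => PySem.Chars.isdigit x == d) := ⟨_, rfl⟩
      have hsplit : c :: rest = (c :: rest.takeWhile p) ++ rest.dropWhile p := by
        simp [List.takeWhile_append_dropWhile]
      have hrunsEq : runsB (c :: rest)
          = (d, c :: rest.takeWhile p) :: runsB (rest.dropWhile p) := by
        subst hp; rw [runsB, hd]
      have hrunAll : ∀ x ∈ c :: rest.takeWhile p, PySem.Chars.isdigit x = d := by
        intro x hx
        rcases List.mem_cons.mp hx with hx | hx
        · subst hx; exact hd
        · have h1 : p x = true := List.mem_takeWhile_imp hx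
          rw [hp] at h1; simpa using h1
      have hrestHead : ∀ c' t, rest.dropWhile p = c' :: t → PySem.Chars.isdigit c' = !d := by
        intro c' t hEq
        have h2 : p c' = false := by
          have h1 := List.head?_dropWhile_not p rest
          rw [hEq] at h1; simpa using h1
        rw [hp] at h2
        have h3 : PySem.Chars.isdigit c' ≠ d := by simpa using h2
        exact Bool.eq_not.mpr h3
      have hlen : (rest.dropWhile p).length ≤ n := by
        have h1 := List.length_dropWhile_le p rest
        simp only [List.length_cons] at hl
        omega
      have hBnd' : ∀ (number' : List Char) (start' : Bool),
          (number' ≠ [] → d = true) → (start' = true → number' = [] → d = false) →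
          BndAB number' start' (rest.dropWhile p) := by
        intro number' start' h1 h2
        cases hdw : rest.dropWhile p with
        | nil => trivial
        | cons c' t =>
          refine ⟨fun hne => ?_, fun hs he => ?_⟩
          · rw [hrestHead c' t hdw, h1 hne]; rfl
          · rw [hrestHead c' t hdw, h2 hs he]; rfl
      rw [hrunsEq, hsplit, List.foldl_append, List.foldl_cons (f := stepB)]
      cases d with
      | true =>
        have hAll : ∀ x ∈ c :: rest.takeWhile p, PySem.Chars.isdigit x = true := hrunAll
        rw [foldA_digits _ hAll, if_neg (by simp)]
        rcases hR with ⟨hs, hl0, hn, hc, hr, hres⟩ | ⟨hs, hn, hl2, hres, hg⟩ |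
          ⟨hs, hn, hl0, hc, hr, hres⟩ | ⟨hs, hn, hl0, hres⟩
        · -- case 1 → case 3a
          subst hl0 hn hc hr hres
          have hsB : stepB (none, gap) (true, c :: rest.takeWhile p)
              = (some (pyInt (c :: rest.takeWhile p)), gap) := by
            simp [stepB]
          rw [hsB]
          apply ih _ hlen
          · exact Or.inr (Or.inr (Or.inl ⟨rfl, by simp, rfl, rfl, rfl, by simp⟩))
          · exact hBnd' _ _ (fun _ => rfl) (fun _ h => absurd h (by simp))
        · -- case 2 → case 3b
          subst hn hres
          have hsB : stepB (some result, gap) (true, c :: rest.takeWhile p)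
              = (some (if PySem.Int.mod gap 2 == 0 then result + pyInt (c :: rest.takeWhile p)
                  else result - pyInt (c :: rest.takeWhile p)), gap) := by
            simp only [stepB]
            simp only [beq_iff_eq, PySem.Int.mod_eq_zero_iff_dvd]
            split_ifs <;> rfl
          rw [hsB]
          apply ih _ hlen
          · refine Or.inr (Or.inr (Or.inr ⟨rfl, by simp, hl2, ?_⟩))
            rw [hg]; simp
          · exact hBnd' _ _ (fun _ => rfl) (fun _ h => absurd h (by simp))
        · -- case 3a with a digit head: contradicts BndAB
          exact absurd (hB.1 hn) (by simp [hd])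
        · exact absurd (hB.1 hn) (by simp [hd])
      | false =>
        have hAll : ∀ x ∈ c :: rest.takeWhile p, PySem.Chars.isdigit x = false := hrunAll
        have hc0 : PySem.Chars.isdigit c = false := hd
        have hAll' : ∀ x ∈ rest.takeWhile p, PySem.Chars.isdigit x = false :=
          fun x hx => hAll x (by simp [hx])
        rcases hR with ⟨hs, hl0, hn, hc, hr, hres⟩ | ⟨hs, hn, hl2, hres, hg⟩ |
          ⟨hs, hn, hl0, hc, hr, hres⟩ | ⟨hs, hn, hl0, hres⟩
        · -- case 1 stays case 1 (start = false: nothing is counted)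
          subst hs hl0 hn hc hr hres
          rw [foldA_nondigits _ hAll]
          have hsB : stepB (none, gap) (false, c :: rest.takeWhile p) = (none, gap) := by
            simp [stepB]
          rw [hsB]
          apply ih _ hlen
          · exact Or.inl ⟨rfl, rfl, rfl, by simp, rfl, rfl⟩
          · exact hBnd' _ _ (fun h => absurd rfl h) (by simp)
        · -- case 2 with a non-digit head: contradicts BndAB
          exact absurd (hB.2 hs hn) (by simp [hd])
        · -- case 3a: the pending first number is flushed → case 2
          subst hl0 hc hr hs
          have h1 : stepA (none, number, 0, 0, true) c
              = (some (pyInt number), [], 1, pyInt number, true) := by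
            simp [stepA, hc0, hn]
          rw [List.foldl_cons, h1, foldA_nondigits _ hAll']
          have hsB : stepB (res, gap) (false, c :: rest.takeWhile p)
              = (res, ((c :: rest.takeWhile p).length : Int)) := by
            rw [hres]; simp [stepB]
          rw [hsB, hres]
          have hcc : (1 : Int) + (if true then ((rest.takeWhile p).length : Int) else 0)
              = ((c :: rest.takeWhile p).length : Int) := by
            simp [List.length_cons]; ring
          rw [hcc]
          apply ih _ hlen
          · exact Or.inr (Or.inl ⟨rfl, rfl, rfl, rfl, rfl⟩)
          · exact hBnd' _ _ (fun h => absurd rfl h) (fun _ _ => rfl)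
        · -- case 3b: the pending number is flushed with char_count's parity → case 2
          subst hs
          obtain ⟨v, hv⟩ := Option.isSome_iff_exists.mp hl0
          subst hv
          have h1 : stepA (some v, number, cc, result, true) c
              = (some (pyInt number), [], 1,
                  (if PySem.Int.mod cc 2 == 0 then result + pyInt number
                   else result - pyInt number), true) := by
            simp [stepA, hc0, hn]
          rw [List.foldl_cons, h1, foldA_nondigits _ hAll']
          have hsB : stepB (res, gap) (false, c :: rest.takeWhile p)
              = (res, ((c :: rest.takeWhile p).length : Int)) := by
            rw [hres]; simp [stepB]
          rw [hsB, hres]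
          have hcc : (1 : Int) + (if true then ((rest.takeWhile p).length : Int) else 0)
              = ((c :: rest.takeWhile p).length : Int) := by
            simp [List.length_cons]; ring
          rw [hcc]
          apply ih _ hlen
          · exact Or.inr (Or.inl ⟨rfl, rfl, rfl, rfl, rfl⟩)
          · exact hBnd' _ _ (fun h => absurd rfl h) (fun _ _ => rfl)

-- ===== VERDICT (by name: the statement is the Claim_ definition above) =====
theorem do_math_spec : Claim_equal_do_math := by
  intro s _
  unfold Spec_do_math do_math do_math_alt
  exact main_sim s.toList.length s.toList le_rfl none [] 0 0 false none 0
    (Or.inl ⟨rfl, rfl, rfl, rfl, rfl, rfl⟩) (by cases s.toList <;> simp [BndAB])
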